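-- pv_equiv track=rewrite | github.com/sageyu123/pyAMPP | pyampp/util/idl_execute_to_gxfov2box.py | _format_multiline_command
-- ===== SOURCE A (Python) =====
-- from typing import Dict, List, Tuple
--
-- def _format_multiline_command(cmd: List[str]) -> str:
--     if len(cmd) <= 3:
--         return " ".join(cmd)
--     out = [cmd[0] + " \\"]
--     i = 1
--     arity = {
--         "--coords": 2,
--         "--box-dims": 3,
--     }
--     while i < len(cmd):
--         if cmd[i].startswith("--"):
--             n = arity.get(cmd[i], 1)
--             vals: List[str] = []
--             j = i + 1
--             while j < len(cmd) and len(vals) < n and not cmd[j].startswith("--"):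
--                 vals.append(cmd[j])
--                 j += 1
--             if vals:
--                 out.append(f"  {cmd[i]} {' '.join(vals)} \\")
--                 i = j
--                 continue
--             # Boolean flag
--             out.append(f"  {cmd[i]} \\")
--             i += 1
--         else:
--             sep = " \\" if i < len(cmd) - 1 else ""
--             out.append(f"  {cmd[i]}{sep}")
--             i += 1
--     # Remove trailing slash from final line.
--     out[-1] = out[-1].rstrip(" \\")
--     return "\n".join(out)
-- ===== SOURCE B (Python) =====
-- from typing import List
--
-- def _format_multiline_command(cmd: List[str]) -> str:
--     if len(cmd) <= 3:
--         return " ".join(cmd)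
--     arity = {"--coords": 2, "--box-dims": 3}
--     # Pass 1: classify each token after cmd[0] as "starts a new line" by an
--     # arithmetic rule: a "--" flag always starts a line; a non-flag token
--     # continues the current line iff its distance to the most recent flag is
--     # within that flag's arity (the next flag, if nearer, is the most recent
--     # one, which is exactly how A's greedy consumption cuts a value run).
--     starts: List[bool] = []
--     last = None  # (index, arity) of the most recent flag
--     for i, tok in enumerate(cmd[1:], start=1):
--         if tok.startswith("--"):
--             starts.append(True)
--             last = (i, arity.get(tok, 1))
--         else:
--             starts.append(last is None or i - last[0] > last[1])
--     # Pass 2: fold the tokens into lines: a starter opens a new line, a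
--     # continuation is appended to the last line.
--     lines = [cmd[0]]
--     for started, tok in zip(starts, cmd[1:]):
--         if started:
--             lines.append("  " + tok)
--         else:
--             lines[-1] += " " + tok
--     # Uniform rendering: " \"-join all lines; the last one is rstripped.
--     return " \\\n".join(lines[:-1] + [lines[-1].rstrip(" \\")])
-- ===== Notes on version B (the rewrite author's own statement) =====
-- stated objective: alternative
-- what changed: Replaces A's greedy single loop (inner while consuming up to arity values per flag, index jumps, inline line formatting with a position-dependent separator) by two staged passes: pass 1 classifies every token by an arithmetic rule -- it starts a new line iff it is a flag or its distance to the most recent flag exceeds that flag's arity -- and pass 2 folds the tokens into lines by that classification, with one uniform backslash-join and a final rstrip.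
import Mathlib
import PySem

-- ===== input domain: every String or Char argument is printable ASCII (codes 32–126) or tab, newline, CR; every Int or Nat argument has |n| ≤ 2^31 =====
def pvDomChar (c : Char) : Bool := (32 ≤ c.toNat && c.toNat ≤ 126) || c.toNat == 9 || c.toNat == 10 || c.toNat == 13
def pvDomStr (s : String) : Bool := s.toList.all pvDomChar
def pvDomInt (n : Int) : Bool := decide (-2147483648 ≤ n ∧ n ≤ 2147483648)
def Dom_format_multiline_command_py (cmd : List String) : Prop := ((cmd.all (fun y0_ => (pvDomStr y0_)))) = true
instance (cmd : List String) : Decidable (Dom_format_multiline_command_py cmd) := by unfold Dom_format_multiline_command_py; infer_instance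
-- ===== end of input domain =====

-- B classifies each token by distance to the most recent flag and folds tokens into lines (objective: alternative); return values proved equal.

-- shared exact primitive: Python's s.rstrip(" \\") (PySem has no chars-rstrip; exact: drop trailing ' '/'\\')
def pvRstripSlash (s : String) : String :=
  String.ofList (((s.toList.reverse).dropWhile (fun c => c == ' ' || c == '\\')).reverse)

-- ===== PORT A =====
-- A's out[-1] = out[-1].rstrip(" \\") on the list of lines
def pvSetLastRstrip : List String → List String
  | [] => []
  | [x] => [pvRstripSlash x]
  | x :: y :: xs => x :: pvSetLastRstrip (y :: xs)

-- A's inner while loop collecting vals (acc = vals so far), returning (vals, remaining suffix = cmd[j:]).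
def pvAGrab (n : Int) (rest : List String) (acc : List String) : List String × List String :=
  match rest with
  | [] => (acc, [])
  | x :: xs =>
    if (acc.length : Int) < n ∧ ¬ PySem.Str.startswith x "--" then
      pvAGrab n xs (acc ++ [x])
    else (acc, x :: xs)

theorem pvAGrab_snd_len (n : Int) (rest acc : List String) :
    (pvAGrab n rest acc).2.length ≤ rest.length := by
  induction rest generalizing acc with
  | nil => simp [pvAGrab]
  | cons x xs ih =>
    rw [pvAGrab]
    split
    · exact Nat.le_trans (ih _) (Nat.le_succ _)
    · simp

def pvAArity : PySem.Dict String Int := PySem.Dict.mk [("--coords", 2), ("--box-dims", 3)]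

-- A's outer while loop over cmd[i:]; 'rs ≠ []' is 'i < len(cmd) - 1'.
def pvALoop (rest : List String) : List String :=
  match rest with
  | [] => []
  | t :: rs =>
    if PySem.Str.startswith t "--" then
      if (pvAGrab (pvAArity.getD t 1) rs []).1 ≠ [] then
        ("  " ++ t ++ " " ++ PySem.Str.join " " (pvAGrab (pvAArity.getD t 1) rs []).1 ++ " \\")
          :: pvALoop (pvAGrab (pvAArity.getD t 1) rs []).2
      else
        ("  " ++ t ++ " \\") :: pvALoop rs
    else
      ("  " ++ t ++ (if rs ≠ [] then " \\" else "")) :: pvALoop rs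
termination_by rest.length
decreasing_by
  · exact Nat.lt_succ_of_le (pvAGrab_snd_len _ _ _)
  · simp
  · simp

def format_multiline_command_py (cmd : List String) : String :=
  if cmd.length ≤ 3 then PySem.Str.join " " cmd
  else match cmd with
    | [] => ""   -- unreachable: length > 3
    | c0 :: rest => PySem.Str.join "\n" (pvSetLastRstrip ((c0 ++ " \\") :: pvALoop rest))

-- ===== PORT B =====
def pvBArity : PySem.Dict String Int := PySem.Dict.mk [("--coords", 2), ("--box-dims", 3)]

-- B's pass 1: the per-token classification loop; 'last' is None or the (index, arity) of the most recent flag.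
def pvBStarts (toks : List String) (i : Int) (last : Option (Int × Int)) : List Bool :=
  match toks with
  | [] => []
  | t :: ts =>
    if PySem.Str.startswith t "--" then
      true :: pvBStarts ts (i + 1) (some (i, pvBArity.getD t 1))
    else
      (match last with
       | none => true
       | some (f, n) => decide (i - f > n)) :: pvBStarts ts (i + 1) last

-- B's lines[-1] += s on the (always nonempty) list of lines
def pvBAddLast : List String → String → List String
  | [], _ => []
  | [x], s => [x ++ s]
  | x :: y :: xs, s => x :: pvBAddLast (y :: xs) s

-- B's pass 2: the fold over zip(starts, cmd[1:]) building the lines.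
def pvBBuild (pairs : List (Bool × String)) (lines : List String) : List String :=
  match pairs with
  | [] => lines
  | (b, t) :: ps =>
    if b then pvBBuild ps (lines ++ ["  " ++ t])
    else pvBBuild ps (pvBAddLast lines (" " ++ t))

-- B's final join: exact for ' \\\n'.join(lines[:-1] + [lines[-1].rstrip(" \\")]) (lines is nonempty)
def pvBFinish (lines : List String) : String :=
  match lines with
  | [] => ""   -- unreachable: lines always contains cmd[0]
  | [x] => pvRstripSlash x
  | x :: y :: ys => x ++ " \\\n" ++ pvBFinish (y :: ys)

def format_multiline_command_py_alt (cmd : List String) : String :=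
  if cmd.length ≤ 3 then PySem.Str.join " " cmd
  else match cmd with
    | [] => ""   -- unreachable: length > 3
    | c0 :: rest => pvBFinish (pvBBuild ((pvBStarts rest 1 none).zip rest) [c0])

-- ===== PRECONDITION & SPEC =====
def Spec_format_multiline_command_py (cmd : List String) (out : String) : Prop := out = format_multiline_command_py_alt cmd
instance (cmd : List String) (out : String) : Decidable (Spec_format_multiline_command_py cmd out) := by unfold Spec_format_multiline_command_py; infer_instance

-- ===== CLAIM (what is proved, stated in full; the proofs are below) =====
def Claim_equal_format_multiline_command_py : Prop := ∀ (cmd : List String), Dom_format_multiline_command_py cmd → Spec_format_multiline_command_py cmd (format_multiline_command_py cmd)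

-- ===== LEMMAS AND PROOFS =====

theorem pv_strExt {s t : String} (h : s.toList = t.toList) : s = t := by
  have := congrArg String.ofList h; simpa using this

theorem pv_str_append_empty (s : String) : s ++ "" = s := by
  apply pv_strExt; simp

theorem pv_join_singleton (sep t : String) : PySem.Str.join sep [t] = t := by
  apply pv_strExt; simp

theorem pv_join_cons (sep t v : String) (vs : List String) :
    PySem.Str.join sep (t :: v :: vs) = t ++ sep ++ PySem.Str.join sep (v :: vs) := by
  apply pv_strExt; simp [PySem.Chars.join_cons_cons]

theorem pv_rstrip_append (s : String) : pvRstripSlash (s ++ " \\") = pvRstripSlash s := by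
  simp [pvRstripSlash, List.dropWhile]

-- proof-side greedy grouping (the common characterisation both ports are reduced to)
def pvGTake (k : Nat) (rest : List String) : List String × List String :=
  match k, rest with
  | 0, rest => ([], rest)
  | _ + 1, [] => ([], [])
  | k + 1, x :: xs =>
    if PySem.Str.startswith x "--" then ([], x :: xs)
    else (x :: (pvGTake k xs).1, (pvGTake k xs).2)

theorem pvGTake_snd_len (k : Nat) (rest : List String) :
    (pvGTake k rest).2.length ≤ rest.length := by
  induction rest generalizing k with
  | nil => cases k <;> simp [pvGTake]
  | cons x xs ih =>
    cases k with
    | zero => simp [pvGTake]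
    | succ k =>
      rw [pvGTake]
      split
      · simp
      · exact Nat.le_trans (ih k) (Nat.le_succ _)

def pvGGroups (rest : List String) : List (List String) :=
  match rest with
  | [] => []
  | t :: rs =>
    if PySem.Str.startswith t "--" then
      (t :: (pvGTake (pvAArity.getD t 1).toNat rs).1)
        :: pvGGroups (pvGTake (pvAArity.getD t 1).toNat rs).2
    else [t] :: pvGGroups rs
termination_by rest.length
decreasing_by
  · exact Nat.lt_succ_of_le (pvGTake_snd_len _ _)
  · simp

def pvVals : List String → String
  | [] => ""
  | v :: vs => " " ++ v ++ pvVals vs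

def pvRender0 (g : List String) : String := "  " ++ PySem.Str.join " " g

def pvRenderS (g : List String) : String := "  " ++ PySem.Str.join " " g ++ " \\"

-- ===== A-side: pvALoop reduces to the grouping =====

theorem pvALoop_nil : pvALoop [] = [] := by rw [pvALoop]

theorem pvGGroups_nil : pvGGroups [] = [] := by rw [pvGGroups]

theorem pvALoop_ne_nil (t : String) (rs : List String) : pvALoop (t :: rs) ≠ [] := by
  rw [pvALoop]
  split
  · split <;> simp
  · simp

theorem pvGGroups_ne_nil (t : String) (rs : List String) : pvGGroups (t :: rs) ≠ [] := by
  rw [pvGGroups]; split <;> simp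

theorem pv_grab_take (rest : List String) (n : Int) (acc : List String) :
    pvAGrab n rest acc =
      (acc ++ (pvGTake (n - acc.length).toNat rest).1, (pvGTake (n - acc.length).toNat rest).2) := by
  induction rest generalizing acc with
  | nil =>
    rcases h : (n - (acc.length : Int)).toNat with _ | m <;> simp [pvAGrab, pvGTake]
  | cons x xs ih =>
    rw [pvAGrab]
    by_cases hn : (acc.length : Int) < n
    · have hm : (n - (acc.length : Int)).toNat = (n - ((acc.length : Int) + 1)).toNat + 1 := by
        omega
      rw [hm, pvGTake]
      by_cases hf : PySem.Str.startswith x "--"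
      · rw [if_neg (by simp; intro _; simpa using hf), if_pos (by simpa using hf)]
        simp
      · rw [if_pos ⟨hn, by simpa using hf⟩, if_neg (by simpa using hf), ih (acc ++ [x])]
        simp
    · have hm : (n - (acc.length : Int)).toNat = 0 := by omega
      rw [hm, pvGTake, if_neg (by tauto)]
      simp

theorem pv_take_fst_nil (k : Nat) (rs : List String) (h : (pvGTake k rs).1 = []) :
    (pvGTake k rs).2 = rs := by
  match k, rs with
  | 0, rs => rfl
  | k + 1, [] => rfl
  | k + 1, x :: xs =>
    rw [pvGTake] at h ⊢
    split at h
    · rw [if_pos (by assumption)]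
    · simp at h

theorem pv_step (line : String) (r : List String)
    (h : pvSetLastRstrip (pvALoop r) = pvSetLastRstrip ((pvGGroups r).map pvRenderS)) :
    pvSetLastRstrip (line :: pvALoop r) =
      pvSetLastRstrip (line :: (pvGGroups r).map pvRenderS) := by
  cases r with
  | nil => rw [pvALoop_nil, pvGGroups_nil]; rfl
  | cons t rs =>
    have ha := pvALoop_ne_nil t rs
    have hb : (pvGGroups (t :: rs)).map pvRenderS ≠ [] := by
      intro hc; exact pvGGroups_ne_nil t rs (List.map_eq_nil_iff.mp hc)
    rcases List.exists_cons_of_ne_nil ha with ⟨a, la, hA⟩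
    rcases List.exists_cons_of_ne_nil hb with ⟨b, lb, hB⟩
    rw [hA, hB]
    rw [hA, hB] at h
    exact congrArg (line :: ·) h

theorem pv_main_aux (N : Nat) : ∀ rest : List String, rest.length ≤ N →
    pvSetLastRstrip (pvALoop rest) = pvSetLastRstrip ((pvGGroups rest).map pvRenderS) := by
  induction N with
  | zero =>
    intro rest h
    have : rest = [] := List.eq_nil_of_length_eq_zero (Nat.le_zero.mp h)
    subst this
    rw [pvALoop_nil, pvGGroups_nil]
    rfl
  | succ N ih =>
    intro rest hlen
    cases rest with
    | nil => rw [pvALoop_nil, pvGGroups_nil]; rfl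
    | cons t rs =>
      rw [pvALoop, pvGGroups]
      by_cases hf : PySem.Str.startswith t "--"
      · rw [if_pos hf, if_pos hf]
        have hgrab := pv_grab_take rs (pvAArity.getD t 1) []
        simp only [List.length_nil, Nat.cast_zero, Int.sub_zero, List.nil_append] at hgrab
        rw [hgrab]
        have hrs : (pvGTake (pvAArity.getD t 1).toNat rs).2.length ≤ N := by
          have := pvGTake_snd_len (pvAArity.getD t 1).toNat rs
          simp only [List.length_cons] at hlen
          omega
        by_cases hv : (pvGTake (pvAArity.getD t 1).toNat rs).1 = []
        · have h2 := pv_take_fst_nil (pvAArity.getD t 1).toNat rs hv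
          rw [if_neg (by simp [hv]), hv, h2, List.map_cons]
          have hrender : pvRenderS [t] = "  " ++ t ++ " \\" := by
            rw [pvRenderS, pv_join_singleton]
          rw [hrender]
          exact pv_step _ _ (ih rs (by simp only [List.length_cons] at hlen; omega))
        · rcases List.exists_cons_of_ne_nil hv with ⟨v, vs, hvv⟩
          rw [if_pos (by simp [hv]), List.map_cons]
          have hline : pvRenderS (t :: (pvGTake (pvAArity.getD t 1).toNat rs).1)
              = "  " ++ t ++ " " ++ PySem.Str.join " " (pvGTake (pvAArity.getD t 1).toNat rs).1 ++ " \\" := by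
            rw [hvv, pvRenderS, pv_join_cons]
            simp [String.append_assoc]
          rw [hline]
          exact pv_step _ _ (ih _ hrs)
      · rw [if_neg hf, if_neg hf, List.map_cons]
        have hrender : pvRenderS [t] = "  " ++ t ++ " \\" := by
          rw [pvRenderS, pv_join_singleton]
        rw [hrender]
        cases rs with
        | nil =>
          rw [if_neg (by simp), pvALoop_nil, pvGGroups_nil]
          show [pvRstripSlash ("  " ++ t ++ "")] = [pvRstripSlash (("  " ++ t) ++ " \\")]
          rw [pv_rstrip_append ("  " ++ t)]
          simp
        | cons u us =>
          rw [if_pos (by simp)]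
          exact pv_step _ _ (ih (u :: us) (by simp only [List.length_cons] at hlen ⊢; omega))

theorem pv_main (rest : List String) :
    pvSetLastRstrip (pvALoop rest) = pvSetLastRstrip ((pvGGroups rest).map pvRenderS) :=
  pv_main_aux rest.length rest le_rfl

-- ===== B-side: pvBStarts/pvBBuild reduce to the grouping =====

theorem pv_addLast_append (L : List String) (x s : String) :
    pvBAddLast (L ++ [x]) s = L ++ [x ++ s] := by
  induction L with
  | nil => rfl
  | cons a l ih =>
    cases l with
    | nil => rfl
    | cons b bs => simpa [pvBAddLast] using ih

theorem pv_addLast_empty (L : List String) : pvBAddLast L "" = L := by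
  match L with
  | [] => rfl
  | [x] => simp [pvBAddLast]
  | x :: y :: xs => simpa [pvBAddLast] using pv_addLast_empty (y :: xs)

theorem pv_addLast_ne_nil (x : String) (l : List String) (s : String) :
    pvBAddLast (x :: l) s ≠ [] := by
  cases l <;> simp [pvBAddLast]

theorem pv_addLast_addLast (L : List String) (a b : String) :
    pvBAddLast (pvBAddLast L a) b = pvBAddLast L (a ++ b) := by
  match L with
  | [] => rfl
  | [x] => simp [pvBAddLast, String.append_assoc]
  | x :: y :: xs =>
    rcases List.exists_cons_of_ne_nil (pv_addLast_ne_nil y xs a) with ⟨m, ms, hM⟩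
    show pvBAddLast (x :: pvBAddLast (y :: xs) a) b = x :: pvBAddLast (y :: xs) (a ++ b)
    rw [hM]
    show x :: pvBAddLast (m :: ms) b = x :: pvBAddLast (y :: xs) (a ++ b)
    rw [← hM, pv_addLast_addLast (y :: xs) a b]

theorem pv_join_vals (t : String) (vs : List String) :
    PySem.Str.join " " (t :: vs) = t ++ pvVals vs := by
  induction vs generalizing t with
  | nil => rw [pv_join_singleton, pvVals, pv_str_append_empty]
  | cons v vs ih =>
    rw [pv_join_cons, ih v, pvVals]
    apply pv_strExt; simp

theorem pv_bstarts_some (toks : List String) : ∀ (f n i : Int) (L : List String),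
    pvBBuild ((pvBStarts toks i (some (f, n))).zip toks) L
      = pvBAddLast L (pvVals (pvGTake (n + f + 1 - i).toNat toks).1)
        ++ (pvGGroups (pvGTake (n + f + 1 - i).toNat toks).2).map pvRender0 := by
  induction toks with
  | nil =>
    intro f n i L
    have h2 : pvGTake (n + f + 1 - i).toNat [] = ([], []) := by
      rcases (n + f + 1 - i).toNat with _ | m <;> rfl
    simp [pvBStarts, pvBBuild, h2, pvGGroups_nil, pvVals, pv_addLast_empty]
  | cons t ts ih =>
    intro f n i L
    rw [pvBStarts]
    by_cases hf : PySem.Str.startswith t "--"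
    · rw [if_pos hf]
      have htk : pvGTake (n + f + 1 - i).toNat (t :: ts) = ([], t :: ts) := by
        rcases (n + f + 1 - i).toNat with _ | m
        · rfl
        · rw [pvGTake, if_pos hf]
      have htk1 : (pvGTake (n + f + 1 - i).toNat (t :: ts)).1 = [] := by rw [htk]
      have htk2 : (pvGTake (n + f + 1 - i).toNat (t :: ts)).2 = t :: ts := by rw [htk]
      rw [htk1, htk2]
      have hbs : pvBArity = pvAArity := rfl
      rw [List.zip_cons_cons, pvBBuild, if_pos rfl,
        ih i (pvBArity.getD t 1) (i + 1) (L ++ ["  " ++ t])]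
      have hm : (pvBArity.getD t 1 + i + 1 - (i + 1)).toNat = (pvAArity.getD t 1).toNat := by
        rw [hbs]; omega
      rw [hm, pv_addLast_append]
      have hgg : pvGGroups (t :: ts)
          = (t :: (pvGTake (pvAArity.getD t 1).toNat ts).1)
            :: pvGGroups (pvGTake (pvAArity.getD t 1).toNat ts).2 := by
        rw [pvGGroups, if_pos hf]
      rw [hgg, List.map_cons, show pvVals ([] : List String) = "" from rfl, pv_addLast_empty]
      have hr : pvRender0 (t :: (pvGTake (pvAArity.getD t 1).toNat ts).1)
          = "  " ++ t ++ pvVals (pvGTake (pvAArity.getD t 1).toNat ts).1 := by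
        rw [pvRender0, pv_join_vals]
        apply pv_strExt; simp
      rw [hr]
      simp
    · rw [if_neg hf, List.zip_cons_cons, pvBBuild]
      by_cases hi : i - f > n
      · have hd : (decide (i - f > n)) = true := by simpa using hi
        have hm0 : (n + f + 1 - i).toNat = 0 := by omega
        have hm0' : (n + f + 1 - (i + 1)).toNat = 0 := by omega
        rw [hd, if_pos rfl, ih f n (i + 1) (L ++ ["  " ++ t]), hm0, hm0']
        have hgg : pvGGroups (t :: ts) = [t] :: pvGGroups ts := by
          rw [pvGGroups, if_neg hf]
        have hr : pvRender0 [t] = "  " ++ t := by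
          rw [pvRender0, pv_join_singleton]
        simp [pvGTake, pvVals, pv_addLast_empty, hgg, hr]
      · have hd : (decide (i - f > n)) = false := by simpa using hi
        have hm : (n + f + 1 - i).toNat = (n + f + 1 - (i + 1)).toNat + 1 := by omega
        rw [hd, if_neg (by simp), ih f n (i + 1) (pvBAddLast L (" " ++ t)), hm, pvGTake,
          if_neg hf]
        rw [pv_addLast_addLast]
        rfl

theorem pv_bstarts_none (toks : List String) : ∀ (i : Int) (L : List String),
    pvBBuild ((pvBStarts toks i none).zip toks) L = L ++ (pvGGroups toks).map pvRender0 := by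
  induction toks with
  | nil => intro i L; simp [pvBStarts, pvBBuild, pvGGroups_nil]
  | cons t ts ih =>
    intro i L
    rw [pvBStarts]
    by_cases hf : PySem.Str.startswith t "--"
    · rw [if_pos hf, List.zip_cons_cons, pvBBuild, if_pos rfl,
        pv_bstarts_some ts i (pvBArity.getD t 1) (i + 1) (L ++ ["  " ++ t])]
      have hbs : pvBArity = pvAArity := rfl
      have hm : (pvBArity.getD t 1 + i + 1 - (i + 1)).toNat = (pvAArity.getD t 1).toNat := by
        rw [hbs]; omega
      rw [hm, pv_addLast_append]
      have hgg : pvGGroups (t :: ts)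
          = (t :: (pvGTake (pvAArity.getD t 1).toNat ts).1)
            :: pvGGroups (pvGTake (pvAArity.getD t 1).toNat ts).2 := by
        rw [pvGGroups, if_pos hf]
      have hr : pvRender0 (t :: (pvGTake (pvAArity.getD t 1).toNat ts).1)
          = "  " ++ t ++ pvVals (pvGTake (pvAArity.getD t 1).toNat ts).1 := by
        rw [pvRender0, pv_join_vals]
        apply pv_strExt; simp
      rw [hgg, List.map_cons, hr]
      simp
    · rw [if_neg hf, List.zip_cons_cons, pvBBuild, if_pos rfl, ih (i + 1) (L ++ ["  " ++ t])]
      have hgg : pvGGroups (t :: ts) = [t] :: pvGGroups ts := by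
        rw [pvGGroups, if_neg hf]
      have hr : pvRender0 [t] = "  " ++ t := by
        rw [pvRender0, pv_join_singleton]
      rw [hgg, List.map_cons, hr]
      simp

-- ===== final rendering: the two tails agree =====

theorem pv_setLast_ne_nil (a : String) (l : List String) : pvSetLastRstrip (a :: l) ≠ [] := by
  cases l <;> simp [pvSetLastRstrip]

theorem pv_finish (L : List String) : ∀ (x : String),
    PySem.Str.join "\n" (pvSetLastRstrip ((x :: L).map (fun s => s ++ " \\")))
      = pvBFinish (x :: L) := by
  induction L with
  | nil =>
    intro x
    rw [List.map_cons, List.map_nil]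
    show PySem.Str.join "\n" [pvRstripSlash (x ++ " \\")] = pvBFinish [x]
    rw [pv_join_singleton, pv_rstrip_append, pvBFinish]
  | cons y ys ih =>
    intro x
    rw [List.map_cons]
    have hm : (y :: ys).map (fun s => s ++ " \\") = (y ++ " \\") :: ys.map (fun s => s ++ " \\") :=
      List.map_cons ..
    show PySem.Str.join "\n" (pvSetLastRstrip ((x ++ " \\") :: (y :: ys).map (fun s => s ++ " \\")))
      = pvBFinish (x :: y :: ys)
    rw [hm]
    show PySem.Str.join "\n" ((x ++ " \\") :: pvSetLastRstrip ((y ++ " \\") :: ys.map (fun s => s ++ " \\")))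
      = pvBFinish (x :: y :: ys)
    have htail := pv_setLast_ne_nil (y ++ " \\") (ys.map (fun s => s ++ " \\"))
    rcases List.exists_cons_of_ne_nil htail with ⟨m, ms, hM⟩
    rw [hM, pv_join_cons, pvBFinish, ← ih y, hm]
    show ((x ++ " \\") ++ "\n") ++ PySem.Str.join "\n" (m :: ms)
      = (x ++ " \\\n") ++ PySem.Str.join "\n" (pvSetLastRstrip ((y ++ " \\") :: ys.map (fun s => s ++ " \\")))
    rw [hM]
    apply pv_strExt; simp

theorem pv_renderS_map (G : List (List String)) :
    G.map pvRenderS = (G.map pvRender0).map (fun s => s ++ " \\") := by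
  rw [List.map_map]; rfl

-- ===== VERDICT (by name: the statement is the Claim_ definition above) =====
theorem format_multiline_command_py_spec : Claim_equal_format_multiline_command_py := by
  intro cmd _
  unfold Spec_format_multiline_command_py format_multiline_command_py format_multiline_command_py_alt
  split
  · rfl
  · match cmd with
    | [] => rfl
    | c0 :: rest =>
      show PySem.Str.join "\n" (pvSetLastRstrip ((c0 ++ " \\") :: pvALoop rest))
          = pvBFinish (pvBBuild ((pvBStarts rest 1 none).zip rest) [c0])
      rw [pv_bstarts_none rest 1 [c0]]
      have h1 : pvSetLastRstrip ((c0 ++ " \\") :: pvALoop rest)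
          = pvSetLastRstrip ((c0 ++ " \\") :: (pvGGroups rest).map pvRenderS) :=
        pv_step _ _ (pv_main rest)
      rw [h1]
      have h2 : (c0 ++ " \\") :: (pvGGroups rest).map pvRenderS
          = ((c0 :: (pvGGroups rest).map pvRender0).map (fun s => s ++ " \\")) := by
        rw [List.map_cons, pv_renderS_map]
      rw [h2, pv_finish]
      rfl
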